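-- pv_equiv track=rewrite | github.com/lonewaler/ofsec | backend/app/services/recon/whois_correlation.py | _is_privacy_protected
-- ===== SOURCE A (Python) =====
-- def _is_privacy_protected(registrant: dict) -> bool:
--     """Detect WHOIS privacy/proxy services."""
--     privacy_indicators = [
--         "privacy", "proxy", "whoisguard", "domainsbyproxy",
--         "contactprivacy", "redacted", "withheld",
--     ]
--     for value in registrant.values():
--         if isinstance(value, str) and any(p in value.lower() for p in privacy_indicators):
--             return True
--     return False
-- ===== SOURCE B (Python) =====
-- def _is_privacy_protected(registrant: dict) -> bool:
--     """Detect WHOIS privacy/proxy services."""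
--     indicators = {
--         "privacy", "proxy", "whoisguard", "domainsbyproxy",
--         "contactprivacy", "redacted", "withheld",
--     }
--     lengths = sorted({len(p) for p in indicators})
--     for value in registrant.values():
--         if not isinstance(value, str):
--             continue
--         t = value.lower()
--         for i in range(len(t)):
--             for L in lengths:
--                 if t[i:i+L] in indicators:
--                     return True
--     return False
-- ===== Notes on version B (the rewrite author's own statement) =====
-- stated objective: alternative
-- what changed: A substring-searches each indicator in each value (p in value.lower()); B instead slides fixed-length windows over each lowered value and tests each window t[i:i+L] (one L per distinct indicator length) for membership in a hash set of the indicators, so no substring-search primitive is used at all.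
import Mathlib
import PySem

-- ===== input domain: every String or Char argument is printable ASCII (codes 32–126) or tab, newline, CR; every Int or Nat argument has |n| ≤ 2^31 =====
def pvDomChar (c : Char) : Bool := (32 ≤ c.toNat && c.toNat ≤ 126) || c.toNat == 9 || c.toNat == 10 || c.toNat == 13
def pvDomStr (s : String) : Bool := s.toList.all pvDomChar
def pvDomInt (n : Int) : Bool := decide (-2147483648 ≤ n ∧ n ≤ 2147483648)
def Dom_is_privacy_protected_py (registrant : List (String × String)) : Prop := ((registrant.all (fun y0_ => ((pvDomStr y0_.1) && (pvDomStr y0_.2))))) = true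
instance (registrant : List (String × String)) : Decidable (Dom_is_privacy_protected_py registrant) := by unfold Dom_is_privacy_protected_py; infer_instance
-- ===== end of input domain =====

-- B replaces A's per-indicator substring search by a sliding-window scan: for each position of the
-- lowered value it checks whether the window of each distinct indicator length lies in the indicator set
-- (alternative algorithm, not measured faster).


-- ===== PORT A =====
-- A's literal list privacy_indicators
def pvPrivacyIndicators : List String :=
  ["privacy", "proxy", "whoisguard", "domainsbyproxy",
   "contactprivacy", "redacted", "withheld"]

-- A's for-loop with early return: 'for value in registrant.values(): if any(p in value.lower() …): return True'
-- (isinstance(value, str) is always true here: values are typed String)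
def pvALoop (vals : List String) : Bool :=
  match vals with
  | [] => false
  | v :: rest =>
      if pvPrivacyIndicators.any (fun p => PySem.Str.isIn p (PySem.Str.lower v)) then true
      else pvALoop rest

def is_privacy_protected_py (registrant : List (String × String)) : Bool :=
  pvALoop (PySem.Dict.ofList registrant).values

-- ===== PORT B =====
-- B's set literal 'indicators' (PySem.Set of the distinct elements)
def pvIndicatorSet : List String :=
  PySem.Set.ofList
    ["privacy", "proxy", "whoisguard", "domainsbyproxy",
     "contactprivacy", "redacted", "withheld"]

-- lengths = sorted({len(p) for p in indicators})
def pvWindowLens : List Int :=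
  PySem.List.sorted (PySem.Set.ofList (pvIndicatorSet.map (fun p => (PySem.Str.len p : Int)))) (fun x => x) false

-- B's triple loop with early return: over values, then i in range(len(t)), then L in lengths,
-- returning True as soon as the window t[i:i+L] is a member of the indicator set
def pvBLoop (vals : List String) : Bool :=
  match vals with
  | [] => false
  | value :: rest =>
      let t := PySem.Str.lower value
      if (PySem.List.pyRange 0 (PySem.Str.len t) 1).any (fun i =>
           pvWindowLens.any (fun L =>
             pvIndicatorSet.contains (PySem.Str.slice t (some i) (some (i + L))))) then true
      else pvBLoop rest

def is_privacy_protected_py_alt (registrant : List (String × String)) : Bool :=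
  pvBLoop (PySem.Dict.ofList registrant).values

-- ===== PRECONDITION & SPEC =====
def Spec_is_privacy_protected_py (registrant : List (String × String)) (out : Bool) : Prop := out = is_privacy_protected_py_alt registrant
instance (registrant : List (String × String)) (out : Bool) : Decidable (Spec_is_privacy_protected_py registrant out) := by unfold Spec_is_privacy_protected_py; infer_instance

-- ===== CLAIM (what is proved, stated in full; the proofs are below) =====
def Claim_equal_is_privacy_protected_py : Prop := ∀ (registrant : List (String × String)), Dom_is_privacy_protected_py registrant → Spec_is_privacy_protected_py registrant (is_privacy_protected_py registrant)

-- ===== LEMMAS AND PROOFS =====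

-- a nonempty pattern is an infix of t iff some window of t of the pattern's length equals it
theorem pv_infix_iff_window {p t : List Char} (hp : p ≠ []) :
    p <:+: t ↔ ∃ i : Nat, i < t.length ∧ (t.drop i).take p.length = p := by
  constructor
  · rintro ⟨s, u, rfl⟩
    refine ⟨s.length, ?_, ?_⟩
    · have : 0 < p.length := List.length_pos_iff.mpr hp
      simp; omega
    · simp
  · rintro ⟨i, _, heq⟩
    exact heq ▸ ((List.take_prefix _ _).isInfix.trans (List.drop_suffix i t).isInfix)

-- the set/list literals coincide (no duplicates) and the length table is what B computes
theorem pv_set_eq : pvIndicatorSet = pvPrivacyIndicators := by decide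
theorem pv_len_mem : ∀ p ∈ pvPrivacyIndicators, ((p.toList.length : Int)) ∈ pvWindowLens ∧ p.toList ≠ [] := by decide
theorem pv_len_pos : ∀ L ∈ pvWindowLens, 0 < L := by decide

-- the per-value checks of A and B agree
theorem pv_value_iff (t : String) :
    pvPrivacyIndicators.any (fun p => PySem.Str.isIn p t) =
      (PySem.List.pyRange 0 (PySem.Str.len t) 1).any (fun i =>
        pvWindowLens.any (fun L =>
          pvIndicatorSet.contains (PySem.Str.slice t (some i) (some (i + L))))) := by
  rw [Bool.eq_iff_iff, List.any_eq_true, List.any_eq_true]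
  constructor
  · rintro ⟨p, hp, hin⟩
    obtain ⟨hL, hne⟩ := pv_len_mem p hp
    rw [PySem.Str.isIn_eq, PySem.Chars.isIn_iff_infix] at hin
    obtain ⟨i, hilt, hwin⟩ := (pv_infix_iff_window hne).mp hin
    refine ⟨(i : Int), ?_, ?_⟩
    · rw [PySem.List.mem_pyRange_one, PySem.Str.len_eq]
      exact ⟨Int.natCast_nonneg i, by exact_mod_cast hilt⟩
    · rw [List.any_eq_true]
      refine ⟨(p.toList.length : Int), hL, ?_⟩
      rw [pv_set_eq, List.contains_iff_mem]
      have hs : (PySem.Str.slice t (some (i : Int)) (some ((i : Int) + (p.toList.length : Int)))).toList = p.toList := by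
        rw [PySem.Str.toList_slice, PySem.Chars.slice_eq_listSlice, PySem.List.slice_natCast_add, hwin]
      have : PySem.Str.slice t (some (i : Int)) (some ((i : Int) + (p.toList.length : Int))) = p := by
        have := congrArg String.ofList hs; simpa using this
      rwa [this]
  · rintro ⟨i, hi, hany⟩
    rw [List.any_eq_true] at hany
    obtain ⟨L, hLmem, hcon⟩ := hany
    rw [PySem.List.mem_pyRange_one, PySem.Str.len_eq] at hi
    obtain ⟨hi0, _⟩ := hi
    have hL0 : 0 < L := pv_len_pos L hLmem
    rw [pv_set_eq, List.contains_iff_mem] at hcon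
    refine ⟨_, hcon, ?_⟩
    rw [PySem.Str.isIn_eq, PySem.Chars.isIn_iff_infix, PySem.Str.toList_slice,
      PySem.Chars.slice_eq_listSlice, PySem.List.slice_toNat _ hi0 (by omega)]
    exact (List.take_prefix _ _).isInfix.trans (List.drop_suffix _ _).isInfix

-- A's and B's early-return loops agree value for value
theorem pv_loop_eq (vals : List String) : pvALoop vals = pvBLoop vals := by
  induction vals with
  | nil => rfl
  | cons v rest ih =>
    rw [pvALoop, pvBLoop, pv_value_iff (PySem.Str.lower v), ih]

-- ===== VERDICT (by name: the statement is the Claim_ definition above) =====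
theorem is_privacy_protected_py_spec : Claim_equal_is_privacy_protected_py := by
  intro registrant _
  unfold Spec_is_privacy_protected_py is_privacy_protected_py is_privacy_protected_py_alt
  exact pv_loop_eq _
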